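-- pv_equiv track=rewrite | github.com/LanChuHoang/hackerrank | dp/house_robber_2.py | max_rob
-- ===== SOURCE A (Python) =====
-- def max_rob(nums: list[int]) -> int:
--     if len(nums) == 1:
--         return nums[0]
--     max_robable = [0 for _ in range(len(nums) + 1)]
--     max_robable[-2] = nums[-1]
--     max_robable[-3] = nums[-2]
--     for i in reversed(range(len(max_robable) - 3)):
--         max_robable[i] = max(max_robable[i + 2], max_robable[i + 3]) + nums[i]
--     return max(max_robable[0], max_robable[1])
-- ===== SOURCE B (Python) =====
-- def max_rob(nums: list[int]) -> int:
--     if len(nums) == 1: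
--         return nums[0]
--     n = len(nums)
--     memo = {}
--
--     def helper(i):
--         if i >= n:
--             return 0
--         if i in memo:
--             return memo[i]
--         v = nums[i] + max(helper(i + 2), helper(i + 3))
--         memo[i] = v
--         return v
--
--     for i in range(n - 1, -1, -1):  # warm the cache back-to-front: each call recurses O(1) deep
--         helper(i)
--     return max(helper(0), helper(1))
-- ===== Notes on version B (the rewrite author's own statement) =====
-- stated objective: alternative
-- what changed: Replaces the bottom-up DP table filled back-to-front with a top-down dict-memoized recursion helper(i) = nums[i] + max(helper(i+2), helper(i+3)), keeping the raw len==1 return.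
import Mathlib
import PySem

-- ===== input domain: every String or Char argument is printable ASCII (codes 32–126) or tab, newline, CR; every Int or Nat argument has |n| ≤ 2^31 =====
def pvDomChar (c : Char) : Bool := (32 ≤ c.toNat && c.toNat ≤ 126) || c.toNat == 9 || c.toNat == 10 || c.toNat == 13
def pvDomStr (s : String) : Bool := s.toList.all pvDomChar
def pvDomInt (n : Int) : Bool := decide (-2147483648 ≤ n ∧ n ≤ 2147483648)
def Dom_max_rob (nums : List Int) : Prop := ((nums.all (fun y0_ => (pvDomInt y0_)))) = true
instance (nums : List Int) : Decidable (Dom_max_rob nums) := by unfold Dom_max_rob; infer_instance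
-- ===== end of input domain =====

-- B replaces A's bottom-up DP table with a top-down dict-memoized recursion of the same
-- recurrence (alternative decomposition, same O(n) cost; B returns 0 on [] where A raises).


-- ===== PORT A =====
-- literal transliteration of A: fill a table of length n+1 from the back
-- ([0 for _ in range(n+1)] = List.replicate; m[-2], m[-3] become set (n-1), set (n-2))
def max_rob (nums : List Int) : Int :=
  if nums.length = 1 then (PySem.List.pyGet? nums 0).getD 0
  else
    let n := nums.length
    let m0 : List Int := List.replicate (n + 1) 0
    let m1 := m0.set (n - 1) ((PySem.List.pyGet? nums (-1)).getD 0)   -- max_robable[-2] = nums[-1]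
    let m2 := m1.set (n - 2) ((PySem.List.pyGet? nums (-2)).getD 0)   -- max_robable[-3] = nums[-2]
    let m := ((List.range (n - 2)).reverse).foldl
      (fun m i =>
        m.set i (max (m.getD (i + 2) 0) (m.getD (i + 3) 0) + (PySem.List.pyGet? nums (i : Int)).getD 0))
      m2
    max (m.getD 0 0) (m.getD 1 0)

-- ===== PORT B =====
-- transliteration of B's helper(i): memoized recursion, the memo dict threaded through
def maxRobHelper (nums : List Int) (n : Nat) (i : Nat) (memo : PySem.Dict Int Int) :
    Int × PySem.Dict Int Int :=
  if _h : n ≤ i then (0, memo)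
  else
    match memo.get? (i : Int) with
    | some v => (v, memo)
    | none =>
      let p := maxRobHelper nums n (i + 2) memo
      let q := maxRobHelper nums n (i + 3) p.2
      let v := (PySem.List.pyGet? nums (i : Int)).getD 0 + max p.1 q.1
      (v, q.2.insert (i : Int) v)
termination_by n - i
decreasing_by all_goals omega

def max_rob_alt (nums : List Int) : Int :=
  if nums.length = 1 then (PySem.List.pyGet? nums 0).getD 0
  else
    let n := nums.length
    -- for i in range(n-1, -1, -1): helper(i)   (warms the cache; only the memo state matters)
    let memo := ((List.range n).reverse).foldl (fun m i => (maxRobHelper nums n i m).2) PySem.Dict.empty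
    let p := maxRobHelper nums n 0 memo
    let q := maxRobHelper nums n 1 p.2
    max p.1 q.1

-- ===== PRECONDITION & SPEC =====
-- Pre_ excludes only the empty list, on which A raises IndexError (max_robable[-2] on a length-1 table).
def Pre_max_rob (nums : List Int) : Prop := nums ≠ []
instance (nums : List Int) : Decidable (Pre_max_rob nums) := by unfold Pre_max_rob; infer_instance
def pvWitness_max_rob : List Int := [2, 7, 9, 3, 1]

def Spec_max_rob (nums : List Int) (out : Int) : Prop := out = max_rob_alt nums
instance (nums : List Int) (out : Int) : Decidable (Spec_max_rob nums out) := by unfold Spec_max_rob; infer_instance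

-- ===== CLAIM (what is proved, stated in full; the proofs are below) =====
def Claim_equal_max_rob : Prop := ∀ (nums : List Int), Dom_max_rob nums → Pre_max_rob nums → Spec_max_rob nums (max_rob nums)

-- ===== LEMMAS AND PROOFS =====

-- the common recurrence both programs compute
def refH (nums : List Int) (i : Nat) : Int :=
  if _h : nums.length ≤ i then 0
  else nums.getD i 0 + max (refH nums (i + 2)) (refH nums (i + 3))
termination_by nums.length - i
decreasing_by all_goals omega

lemma refH_of_ge (nums : List Int) (i : Nat) (h : nums.length ≤ i) : refH nums i = 0 := by
  rw [refH]; simp [h]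

lemma refH_of_lt (nums : List Int) (i : Nat) (h : i < nums.length) :
    refH nums i = nums.getD i 0 + max (refH nums (i + 2)) (refH nums (i + 3)) := by
  rw [refH]; simp [Nat.not_le.mpr h]

def MemoOK (nums : List Int) (memo : PySem.Dict Int Int) : Prop :=
  ∀ k v, memo.get? k = some v → ∃ j : Nat, k = (j : Int) ∧ v = refH nums j

lemma memoOK_empty (nums : List Int) : MemoOK nums PySem.Dict.empty := by
  intro k v h; simp [PySem.Dict.empty, PySem.Dict.get?] at h

lemma helper_correct (nums : List Int) (i : Nat) (memo : PySem.Dict Int Int)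
    (hm : MemoOK nums memo) :
    (maxRobHelper nums nums.length i memo).1 = refH nums i ∧
      MemoOK nums (maxRobHelper nums nums.length i memo).2 := by
  rw [maxRobHelper]
  by_cases h : nums.length ≤ i
  · simp only [h, dif_pos]
    exact ⟨(refH_of_ge nums i h).symm, hm⟩
  · simp only [h, dif_neg, not_false_iff]
    rcases hv : memo.get? (i : Int) with _ | v
    · simp only
      have h2 := helper_correct nums (i + 2) memo hm
      have h3 := helper_correct nums (i + 3) (maxRobHelper nums nums.length (i + 2) memo).2 h2.2
      refine ⟨?_, ?_⟩
      · rw [h2.1, h3.1, refH_of_lt nums i (by omega)]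
        simp [PySem.List.pyGet?_natCast, List.getD]
      · intro k v hk
        by_cases hki : k = (i : Int)
        · subst hki
          rw [PySem.Dict.get?_insert_self] at hk
          refine ⟨i, rfl, ?_⟩
          cases hk
          rw [h2.1, h3.1, refH_of_lt nums i (by omega)]
          simp [PySem.List.pyGet?_natCast, List.getD]
        · rw [PySem.Dict.get?_insert_of_ne _ _ hki] at hk
          exact h3.2 k v hk
    · simp only
      obtain ⟨j, hj, hv'⟩ := hm _ _ hv
      have : j = i := by exact_mod_cast hj.symm
      subst this
      exact ⟨hv', hm⟩
termination_by nums.length - i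
decreasing_by all_goals omega

-- the cache-warming loop preserves the memo invariant
lemma warm_ok (nums : List Int) (l : List Nat) (memo : PySem.Dict Int Int) (hm : MemoOK nums memo) :
    MemoOK nums (l.foldl (fun m i => (maxRobHelper nums nums.length i m).2) memo) := by
  induction l generalizing memo with
  | nil => exact hm
  | cons i l ih => exact ih _ ((helper_correct nums i memo hm).2)

-- A-side: the backwards foldl establishes refH on every index ≥ k
lemma foldA (nums : List Int) (k : Nat) (hk : k + 2 ≤ nums.length) :
    ∀ (m : List Int), m.length = nums.length + 1 →
      (∀ j, k ≤ j → m.getD j 0 = refH nums j) →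
      (((List.range k).reverse).foldl
        (fun m i =>
          m.set i (max (m.getD (i + 2) 0) (m.getD (i + 3) 0) + (PySem.List.pyGet? nums (i : Int)).getD 0))
        m).getD 0 0 = refH nums 0 ∧
      (((List.range k).reverse).foldl
        (fun m i =>
          m.set i (max (m.getD (i + 2) 0) (m.getD (i + 3) 0) + (PySem.List.pyGet? nums (i : Int)).getD 0))
        m).getD 1 0 = refH nums 1 := by
  induction k with
  | zero =>
    intro m _ hinv
    simp only [List.range_zero, List.reverse_nil, List.foldl_nil]
    exact ⟨hinv 0 (Nat.le_refl 0), hinv 1 (Nat.zero_le 1)⟩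
  | succ k ih =>
    intro m hlen hinv
    rw [List.range_succ, List.reverse_append, List.reverse_singleton, List.singleton_append,
      List.foldl_cons]
    apply ih (by omega)
    · simpa using hlen
    · intro j hj
      by_cases hjk : j = k
      · subst hjk
        have hmem : j < m.length := by omega
        have : (m.set j (max (m.getD (j + 2) 0) (m.getD (j + 3) 0) + (PySem.List.pyGet? nums (j : Int)).getD 0)).getD j 0
            = max (m.getD (j + 2) 0) (m.getD (j + 3) 0) + (PySem.List.pyGet? nums (j : Int)).getD 0 := by
          rw [List.getD, List.getElem?_set_self hmem, Option.getD_some]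
        rw [this, hinv (j + 2) (by omega), hinv (j + 3) (by omega),
          refH_of_lt nums j (by omega)]
        simp [PySem.List.pyGet?_natCast, List.getD]
        ring
      · have : (m.set k (max (m.getD (k + 2) 0) (m.getD (k + 3) 0) + (PySem.List.pyGet? nums (k : Int)).getD 0)).getD j 0
            = m.getD j 0 := by
          simp [List.getD, List.getElem?_set_ne (by omega : k ≠ j)]
        rw [this]
        exact hinv j (by omega)

-- the initial table (after the two negative-index assignments) satisfies the invariant at n-2
lemma init_inv (nums : List Int) (hn : 2 ≤ nums.length) (j : Nat) (hj : nums.length - 2 ≤ j) :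
    (((List.replicate (nums.length + 1) (0 : Int)).set (nums.length - 1)
        ((PySem.List.pyGet? nums (-1)).getD 0)).set (nums.length - 2)
        ((PySem.List.pyGet? nums (-2)).getD 0)).getD j 0 = refH nums j := by
  have hget1 : (PySem.List.pyGet? nums (-1)).getD 0 = nums.getD (nums.length - 1) 0 := by
    rw [show (-1 : Int) = -((1 : Nat) : Int) by norm_num,
      PySem.List.pyGet?_neg_natCast nums 1 (by omega) (by omega)]
    simp [List.getD]
  have hget2 : (PySem.List.pyGet? nums (-2)).getD 0 = nums.getD (nums.length - 2) 0 := by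
    rw [show (-2 : Int) = -((2 : Nat) : Int) by norm_num,
      PySem.List.pyGet?_neg_natCast nums 2 (by omega) (by omega)]
    simp [List.getD]
  by_cases h2 : j = nums.length - 2
  · subst h2
    rw [List.getD, List.getElem?_set_self (by simp only [List.length_set, List.length_replicate]; omega), Option.getD_some, hget2,
      refH_of_lt nums (nums.length - 2) (by omega),
      refH_of_ge nums (nums.length - 2 + 2) (by omega),
      refH_of_ge nums (nums.length - 2 + 3) (by omega)]
    simp
  · by_cases h1 : j = nums.length - 1
    · subst h1
      rw [List.getD, List.getElem?_set_ne (by omega), List.getElem?_set_self (by simp only [List.length_replicate]; omega),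
        Option.getD_some, hget1,
        refH_of_lt nums (nums.length - 1) (by omega),
        refH_of_ge nums (nums.length - 1 + 2) (by omega),
        refH_of_ge nums (nums.length - 1 + 3) (by omega)]
      simp
    · have hge : nums.length ≤ j := by omega
      rw [refH_of_ge nums j hge, List.getD, List.getElem?_set_ne (by omega),
        List.getElem?_set_ne (by omega), List.getElem?_replicate]
      split <;> simp

lemma max_rob_eq (nums : List Int) (h : nums ≠ []) : max_rob nums = max_rob_alt nums := by
  by_cases h1 : nums.length = 1
  · unfold max_rob max_rob_alt
    rw [if_pos h1, if_pos h1]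
  · have hn : 2 ≤ nums.length := by
      cases nums with
      | nil => exact absurd rfl h
      | cons x xs => simp only [List.length_cons] at h1 ⊢; omega
    unfold max_rob max_rob_alt
    rw [if_neg h1, if_neg h1]
    dsimp only
    have hw := warm_ok nums ((List.range nums.length).reverse) PySem.Dict.empty (memoOK_empty nums)
    have hB0 := helper_correct nums 0 _ hw
    have hB1 := helper_correct nums 1 (maxRobHelper nums nums.length 0
      (((List.range nums.length).reverse).foldl (fun m i => (maxRobHelper nums nums.length i m).2)
        PySem.Dict.empty)).2 hB0.2
    have hA := foldA nums (nums.length - 2) (by omega)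
      (((List.replicate (nums.length + 1) (0 : Int)).set (nums.length - 1)
          ((PySem.List.pyGet? nums (-1)).getD 0)).set (nums.length - 2)
          ((PySem.List.pyGet? nums (-2)).getD 0))
      (by simp) (fun j hj => init_inv nums hn j hj)
    rw [hA.1, hA.2, hB0.1, hB1.1]

-- ===== VERDICT (by name: the statement is the Claim_ definition above) =====
theorem max_rob_spec : Claim_equal_max_rob := by
  intro nums _ hpre
  unfold Spec_max_rob
  exact max_rob_eq nums hpre
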